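-- pv_equiv track=rewrite | github.com/IlyaGusev/-nlp-tools | scripts/semeval2016.py | get_separator_borders
-- ===== SOURCE A (Python) =====
-- def get_separator_borders(text):
--     separator_borders = []
--     separators = ','
--     prev = 0
--     for i in range(len(text)):
--         if text[i] in separators:
--             separator_borders.append((prev, i))
--             prev = i
--     separator_borders.append((prev, len(text) - 1))
--     return separator_borders
-- ===== SOURCE B (Python) =====
-- def get_separator_borders(text):
--     def rec(prev, start):
--         j = text.find(',', start)
--         if j == -1:
--             return [(prev, len(text) - 1)]
--         return [(prev, j)] + rec(j, j + 1)
--     return rec(0, 0)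
-- ===== Notes on version B (the rewrite author's own statement) =====
-- stated objective: alternative
-- what changed: Replaces A's per-character scan with state threading by a recursive decomposition that jumps from comma to comma with str.find, emitting one border pair per recursive step.
import Mathlib
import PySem

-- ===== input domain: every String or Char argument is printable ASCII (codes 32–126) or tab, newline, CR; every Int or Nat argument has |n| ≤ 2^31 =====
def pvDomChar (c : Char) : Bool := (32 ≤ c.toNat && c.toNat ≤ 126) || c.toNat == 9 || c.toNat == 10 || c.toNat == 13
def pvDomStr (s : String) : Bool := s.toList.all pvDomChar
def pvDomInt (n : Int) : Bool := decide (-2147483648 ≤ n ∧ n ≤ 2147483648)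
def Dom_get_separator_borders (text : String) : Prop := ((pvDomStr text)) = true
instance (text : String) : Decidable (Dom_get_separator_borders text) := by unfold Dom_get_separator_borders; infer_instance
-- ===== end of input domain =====

-- B replaces A's per-character scan (threading a running prev) by a recursion that jumps
-- from comma to comma with str.find, emitting one border pair per step (objective: alternative).

-- ===== PORT A =====
-- stateful scan: for i in range(len(text)): if text[i] in ',': append (prev, i); prev = i
def get_separator_borders (text : String) : List (Int × Int) :=
  let cs := text.toList
  let st :=
    (PySem.List.pyRange 0 (PySem.Str.len text) 1).foldl
      (fun (st : List (Int × Int) × Int) i =>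
        if PySem.List.pyGet? cs i = some ',' then (st.1 ++ [(st.2, i)], i) else st)
      ([], 0)
  st.1 ++ [(st.2, PySem.Str.len text - 1)]

-- ===== PORT B =====
-- def rec(prev, start): j = text.find(',', start); if j == -1: [(prev, len(text)-1)]
--                       else [(prev, j)] + rec(j, j + 1)
-- fuel = text.length + 1 is a totality guard only: the recursion always stops within it,
-- because each step moves start past the comma found at j ≥ start.
def pvBFind (text : String) (fuel : Nat) (prev : Int) (start : Nat) : List (Int × Int) :=
  match fuel with
  | 0 => [(prev, PySem.Str.len text - 1)]
  | fuel + 1 =>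
    let j := PySem.Str.findFrom text "," (start : Int) none
    if j = -1 then [(prev, PySem.Str.len text - 1)]
    else [(prev, j)] ++ pvBFind text fuel j (j.toNat + 1)

def get_separator_borders_alt (text : String) : List (Int × Int) :=
  pvBFind text (text.length + 1) 0 0

-- ===== PRECONDITION & SPEC =====
def Spec_get_separator_borders (text : String) (out : List (Int × Int)) : Prop := out = get_separator_borders_alt text
instance (text : String) (out : List (Int × Int)) : Decidable (Spec_get_separator_borders text out) := by unfold Spec_get_separator_borders; infer_instance

-- ===== CLAIM (what is proved, stated in full; the proofs are below) =====
def Claim_equal_get_separator_borders : Prop := ∀ (text : String), Dom_get_separator_borders text → Spec_get_separator_borders text (get_separator_borders text)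

-- ===== LEMMAS AND PROOFS =====

-- list of absolute indices of commas in cs, where cs starts at absolute offset o
def pvCommaIdx : List Char → Int → List Int
  | [], _ => []
  | c :: t, o => if c = ',' then o :: pvCommaIdx t (o + 1) else pvCommaIdx t (o + 1)

-- A's loop over enumerate: the scan produces exactly the zipped boundary pairs.
theorem pv_scan_eq_zip (cs : List Char) (s prev last : Int) (acc : List (Int × Int)) :
    (let st := (PySem.List.enumerate cs s).foldl
        (fun (st : List (Int × Int) × Int) (p : Int × Char) =>
          if p.2 = ',' then (st.1 ++ [(st.2, p.1)], p.1) else st) (acc, prev)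
     st.1 ++ [(st.2, last)])
    = acc ++ List.zip
        (prev :: ((PySem.List.enumerate cs s).filter (fun p => p.2 == ',')).map (·.1))
        ((((PySem.List.enumerate cs s).filter (fun p => p.2 == ',')).map (·.1)) ++ [last]) := by
  induction cs generalizing s prev acc with
  | nil => simp [PySem.List.enumerate]
  | cons c cs ih =>
    rw [PySem.List.enumerate_cons]
    by_cases hc : c = ','
    · simp only [List.foldl_cons, List.filter_cons, hc, if_pos, List.map_cons, beq_self_eq_true]
      simp only [List.zip_cons_cons, List.cons_append]
      rw [ih (s + 1) s (acc ++ [(prev, s)])]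
      simp
    · simp only [List.foldl_cons, List.filter_cons, hc]
      have : (c == ',') = false := by simpa using hc
      simp only [this]
      exact ih (s + 1) prev acc

-- A's fold over range-with-indexing is the fold over enumerate.
theorem pv_range_eq_enumerate (cs : List Char) (acc : List (Int × Int)) (prev : Int) :
    (PySem.List.pyRange 0 (cs.length : Int) 1).foldl
      (fun (st : List (Int × Int) × Int) i =>
        if PySem.List.pyGet? cs i = some ',' then (st.1 ++ [(st.2, i)], i) else st)
      (acc, prev)
    = (PySem.List.enumerate cs 0).foldl
        (fun (st : List (Int × Int) × Int) (p : Int × Char) =>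
          if p.2 = ',' then (st.1 ++ [(st.2, p.1)], p.1) else st) (acc, prev) := by
  rw [PySem.List.enumerate_eq_map_pyRange (d := ' '), List.foldl_map]
  apply PySem.List.foldl_congr_mem
  intro st i hi
  have hb := (PySem.List.mem_pyRange_one).1 hi
  have h0 : (0:Int) ≤ i := by simpa using hb.1
  have hlen : i < (cs.length : Int) := by simpa using hb.2
  have hlt : i.toNat < cs.length := by omega
  rw [PySem.List.pyGet?_eq_some_getElem cs h0 (by simpa using hlen),
      PySem.List.pyGetD_eq_getElem cs ' ' h0 (by simpa using hlen)]
  simp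

-- enumerate/filter/map form of the comma positions equals pvCommaIdx
theorem pv_enum_eq_commaIdx (cs : List Char) (s : Int) :
    ((PySem.List.enumerate cs s).filter (fun p => p.2 == ',')).map (·.1) = pvCommaIdx cs s := by
  induction cs generalizing s with
  | nil => simp [PySem.List.enumerate, pvCommaIdx]
  | cons c t ih =>
    rw [PySem.List.enumerate_cons]
    by_cases hc : c = ','
    · simp [pvCommaIdx, hc, ih]
    · have : (c == ',') = false := by simpa using hc
      simp [pvCommaIdx, hc, this, ih]

theorem pv_singleton_prefix (a : Char) (l : List Char) :
    [a] <+: l ↔ ∃ t, l = a :: t := by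
  cases l with
  | nil => simp
  | cons c t =>
    constructor
    · intro h
      rcases (List.cons_prefix_cons.1 h) with ⟨rfl, -⟩
      exact ⟨t, rfl⟩
    · rintro ⟨t', ht⟩
      cases ht
      exact List.cons_prefix_cons.2 ⟨rfl, List.nil_prefix⟩

theorem pv_commaIdx_nil (l : List Char) (o : Int) (h : ',' ∉ l) : pvCommaIdx l o = [] := by
  induction l generalizing o with
  | nil => rfl
  | cons c t ih =>
    have hc : c ≠ ',' := fun hc => h (hc ▸ List.mem_cons_self)
    have hm : ',' ∉ t := fun ht => h (List.mem_cons_of_mem _ ht)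
    simp only [pvCommaIdx, if_neg hc]
    exact ih (o + 1) hm

-- uniqueness: an index with the first-occurrence property is the find
theorem pv_find_unique (l : List Char) (g : Nat)
    (hp : [','] <+: l.drop g) (hmin : ∀ i, i < g → ¬ [','] <+: l.drop i) :
    PySem.Chars.find l [','] = (g : Int) := by
  have hin : PySem.Chars.isIn [','] l = true :=
    (PySem.Chars.exists_prefix_drop_iff_isIn [','] l).1 ⟨g, hp⟩
  have hinf : [','] <:+: l := (PySem.Chars.isIn_iff_infix [','] l).1 hin
  have hnn : 0 ≤ PySem.Chars.find l [','] := (PySem.Chars.find_nonneg_iff l [',']).2 hinf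
  obtain ⟨hp', hmin'⟩ := PySem.Chars.find_spec hnn
  have hgm : g = (PySem.Chars.find l [',']).toNat := by
    rcases Nat.lt_trichotomy g (PySem.Chars.find l [',']).toNat with h | h | h
    · exact absurd hp (hmin' g h)
    · exact h
    · exact absurd hp' (hmin _ h)
  omega

-- first comma at relative index f: pvCommaIdx unfolds one comma
theorem pv_commaIdx_step (l : List Char) (o : Int) (f : Int)
    (hf : PySem.Chars.find l [','] = f) (h0 : 0 ≤ f) :
    pvCommaIdx l o = (o + f) :: pvCommaIdx (l.drop (f.toNat + 1)) (o + f + 1) := by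
  induction l generalizing o f with
  | nil =>
    exfalso
    have : [','] <:+: ([] : List Char) := (PySem.Chars.find_nonneg_iff [] [',']).1 (hf ▸ h0)
    simp at this
  | cons c t ih =>
    obtain ⟨hp, hmin⟩ := PySem.Chars.find_spec (s := c :: t) (sub := [',']) (hf ▸ h0)
    by_cases hc : c = ','
    · have hf0 : f = 0 := by
        by_contra hne
        have hlt : 0 < (PySem.Chars.find (c :: t) [',']).toNat := by omega
        exact hmin 0 hlt ((pv_singleton_prefix ',' (c :: t)).2 ⟨t, by rw [hc]⟩)
      subst hf0
      simp [pvCommaIdx, hc]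
    · have hf1 : 1 ≤ f := by
        rcases Nat.eq_zero_or_pos (PySem.Chars.find (c :: t) [',']).toNat with h | h
        · exfalso
          rw [h] at hp
          rcases (pv_singleton_prefix ',' ((c :: t).drop 0)).1 hp with ⟨t', ht⟩
          simp at ht
          exact hc ht.1
        · omega
      have hft : PySem.Chars.find t [','] = f - 1 := by
        have hcast : (((f - 1).toNat : Nat) : Int) = f - 1 := by omega
        rw [← hcast]
        apply pv_find_unique t (f - 1).toNat
        · have : t.drop (f - 1).toNat = (c :: t).drop f.toNat := by
            have : f.toNat = (f - 1).toNat + 1 := by omega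
            rw [this]; rfl
          rw [this]
          have : ((PySem.Chars.find (c :: t) [','] ).toNat) = f.toNat := by rw [hf]
          exact this ▸ hp
        · intro i hi hpre
          have : (c :: t).drop (i + 1) = t.drop i := rfl
          have h2 : i + 1 < (PySem.Chars.find (c :: t) [',']).toNat := by
            rw [hf]; omega
          exact hmin (i + 1) h2 (this ▸ hpre)
      have hih := ih (o + 1) (f - 1) hft (by omega)
      simp only [pvCommaIdx, if_neg hc]
      have hdrop : List.drop ((f - 1).toNat + 1) t = List.drop (f.toNat + 1) (c :: t) := by
        have h2 : f.toNat + 1 = ((f - 1).toNat + 1) + 1 := by omega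
        rw [h2]; rfl
      have ho1 : o + 1 + (f - 1) = o + f := by ring
      rw [hih, hdrop, ho1]

-- B's recursion computes the zipped boundary pairs of the remaining suffix
theorem pv_bfind_eq_zip (text : String) (fuel start : Nat) (prev : Int)
    (hs : start ≤ text.length) (hfuel : text.length - start < fuel) :
    pvBFind text fuel prev start
      = List.zip (prev :: pvCommaIdx (text.toList.drop start) (start : Int))
          (pvCommaIdx (text.toList.drop start) (start : Int) ++ [(text.length : Int) - 1]) := by
  induction fuel generalizing start prev with
  | zero => omega
  | succ fuel ih =>
    have hlen : text.toList.length = text.length := by simp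
    have hstep : PySem.Str.findFrom text "," (start : Int) none
        = if PySem.Chars.find (text.toList.drop start) [','] = -1 then (-1 : Int)
          else (start : Int) + PySem.Chars.find (text.toList.drop start) [','] := by
      rw [PySem.Str.findFrom_eq]
      have : (",").toList = [','] := rfl
      rw [this]
      exact PySem.Chars.findFrom_natCast text.toList [','] start (by omega)
    by_cases hnone : PySem.Chars.find (text.toList.drop start) [','] = -1
    · have hnc : ',' ∉ text.toList.drop start := by
        intro hmem
        exact (PySem.Chars.find_eq_neg_one_iff _ _).1 hnone
          ((List.singleton_infix_iff ',' _).2 hmem)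
      have hfindn : PySem.Str.findFrom text "," (start : Int) none = -1 := by
        rw [hstep, if_pos hnone]
      rw [pv_commaIdx_nil _ _ hnc]
      simp only [pvBFind, hfindn, ite_true]
      simp [PySem.Str.len]
    · set f := PySem.Chars.find (text.toList.drop start) [','] with hfdef
      have hfnn : 0 ≤ f := by
        have := PySem.Chars.neg_one_le_find (text.toList.drop start) [',']
        rcases lt_or_eq_of_le this with h | h
        · omega
        · exact absurd h.symm hnone
      have hj : (start : Int) + f ≠ -1 := by omega
      -- the comma lies inside the string
      have hflt : f.toNat < text.length - start := by
        obtain ⟨hp, -⟩ := PySem.Chars.find_spec (s := text.toList.drop start) (sub := [',']) hfnn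
        have hne : (text.toList.drop start).drop f.toNat ≠ [] := by
          intro hnil
          rw [hnil] at hp
          simp at hp
        have hlt := mt List.drop_eq_nil_iff.2 hne
        simp only [not_le, List.length_drop, hlen] at hlt
        omega
      have hfind : PySem.Str.findFrom text "," (start : Int) none = (start : Int) + f := by
        rw [hstep, if_neg hnone]
      rw [pv_commaIdx_step _ _ f hfdef.symm hfnn]
      simp only [pvBFind, hfind, if_neg hj]
      have htonat : ((start : Int) + f).toNat = start + f.toNat := by omega
      have hns : start + f.toNat + 1 ≤ text.length := by omega
      have ihx := ih (start + f.toNat + 1) ((start : Int) + f) hns (by omega)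
      have hdd : (text.toList.drop start).drop (f.toNat + 1)
          = text.toList.drop (start + f.toNat + 1) := by
        rw [List.drop_drop]; congr 1
      have hcast : ((start + f.toNat + 1 : Nat) : Int) = (start : Int) + f + 1 := by
        push_cast; omega
      rw [htonat, ihx, hdd, hcast]
      simp [List.zip_cons_cons]

-- ===== VERDICT (by name: the statement is the Claim_ definition above) =====
theorem get_separator_borders_spec : Claim_equal_get_separator_borders := by
  intro text _
  show get_separator_borders text = get_separator_borders_alt text
  simp only [get_separator_borders, get_separator_borders_alt, PySem.Str.len_eq]
  rw [pv_range_eq_enumerate text.toList [] 0]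
  have hA := pv_scan_eq_zip text.toList 0 0 ((text.toList.length : Int) - 1) []
  have hB := pv_bfind_eq_zip text (text.length + 1) 0 0 (by omega) (by omega)
  simp only [List.nil_append] at hA
  rw [hA, hB]
  simp [pv_enum_eq_commaIdx]
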